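-- pv_equiv track=rewrite | github.com/sigbbe/sigbb_algorithms | scripts_for_exam_2021/knn.py | determine_label
-- ===== SOURCE A (Python) =====
-- def determine_label(nodes, clusters):
--     cluster_count = {}
--     # Iterate clusters
--     for cluster_key, value in clusters.items():
--         cluster_count[str(cluster_key)] = 0
--
--         # Check all node against cluster
--         for node in nodes:
--             label = list(node.keys())[0]
--
--             # If label is in cluster, increment appearance
--             if label in value:
--                 cluster_count[str(cluster_key)
--                               ] = cluster_count[str(cluster_key)] + 1
--
--     # Return cluster with most appearances
--     return max(cluster_count, key=cluster_count.get)
-- ===== SOURCE B (Python) =====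
-- def determine_label(nodes, clusters):
--     # Build an inverted index label -> list of cluster keys, plus zero-initialized
--     # counts in cluster-insertion order; then a single pass over nodes.
--     index = {}
--     counts = {}
--     for cluster_key, value in clusters.items():
--         k = str(cluster_key)
--         counts[k] = 0
--         for label in value:
--             ks = index.setdefault(label, [])
--             if k not in ks:
--                 ks.append(k)
--     for node in nodes:
--         label = list(node.keys())[0]
--         for k in index.get(label, []):
--             counts[k] += 1
--     return max(counts, key=counts.get)
-- ===== Notes on version B (the rewrite author's own statement) =====
-- stated objective: faster
-- what changed: Replaces the nested clusters-by-nodes rescan with an inverted index (label -> cluster keys) built in one pass over clusters, followed by a single pass over nodes incrementing counts via the index.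
import Mathlib
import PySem

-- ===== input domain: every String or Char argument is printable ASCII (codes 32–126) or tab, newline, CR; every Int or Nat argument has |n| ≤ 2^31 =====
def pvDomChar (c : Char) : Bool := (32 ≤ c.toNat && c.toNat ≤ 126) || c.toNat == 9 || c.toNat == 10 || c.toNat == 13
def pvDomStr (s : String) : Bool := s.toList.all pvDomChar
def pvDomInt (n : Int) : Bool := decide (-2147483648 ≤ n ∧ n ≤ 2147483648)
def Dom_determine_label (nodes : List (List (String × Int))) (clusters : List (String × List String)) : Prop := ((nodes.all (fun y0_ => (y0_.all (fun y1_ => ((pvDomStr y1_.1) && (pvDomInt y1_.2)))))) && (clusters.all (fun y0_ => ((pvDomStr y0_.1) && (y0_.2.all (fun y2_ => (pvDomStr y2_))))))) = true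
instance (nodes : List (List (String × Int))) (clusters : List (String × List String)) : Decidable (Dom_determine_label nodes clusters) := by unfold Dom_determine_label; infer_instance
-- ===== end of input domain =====

-- B replaces A's nested clusters-by-nodes rescan with an inverted index (label -> cluster keys)
-- built once from the clusters, followed by a single counting pass over the nodes (objective: faster).

-- ===== PORT A =====
-- dict parameters arrive as insertion-order association lists; PySem.Dict.ofList materializes
-- the Python dict (duplicate keys: first position, last value), exactly as Python receives them.
-- list(node.keys())[0] is ported as .keys.head?; the 'none' branch is Python's IndexError,
-- excluded by Pre_; the final 'none' branch is max's ValueError on an empty dict, excluded by Pre_.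
def determine_label (nodes : List (List (String × Int))) (clusters : List (String × List String)) : String :=
  let cluster_count : PySem.Dict String Int :=
    (PySem.Dict.ofList clusters).items.foldl (fun cc kv =>
      nodes.foldl (fun cc node =>
        match (PySem.Dict.ofList node).keys.head? with
        | some label =>
            if kv.2.contains label then cc.insert kv.1 (cc.getD kv.1 0 + 1) else cc
        | none => cc) (cc.insert kv.1 (0 : Int))) PySem.Dict.empty
  match PySem.List.max? cluster_count.keys (fun k => cluster_count.getD k 0) with
  | some k => k
  | none => ""

-- ===== PORT B =====
def determine_label_alt (nodes : List (List (String × Int))) (clusters : List (String × List String)) : String :=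
  let ic : PySem.Dict String (List String) × PySem.Dict String Int :=
    (PySem.Dict.ofList clusters).items.foldl (fun p kv =>
      (kv.2.foldl (fun idx label =>
          let ks := idx.getD label []
          if ks.contains kv.1 then idx else idx.insert label (ks ++ [kv.1])) p.1,
       p.2.insert kv.1 (0 : Int)))
      (PySem.Dict.empty, PySem.Dict.empty)
  let counts : PySem.Dict String Int :=
    nodes.foldl (fun counts node =>
      match (PySem.Dict.ofList node).keys.head? with
      | some label =>
          (ic.1.getD label []).foldl (fun c k => c.insert k (c.getD k 0 + 1)) counts
      | none => counts) ic.2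
  match PySem.List.max? counts.keys (fun k => counts.getD k 0) with
  | some k => k
  | none => ""

-- ===== PRECONDITION & SPEC =====
-- Python A raises on an empty clusters dict (ValueError from max) and on a node that is an
-- empty dict (IndexError from list(node.keys())[0]); exactly those inputs are excluded.
def Pre_determine_label (nodes : List (List (String × Int))) (clusters : List (String × List String)) : Prop :=
  clusters ≠ [] ∧ ∀ node ∈ nodes, node ≠ []
instance (nodes : List (List (String × Int))) (clusters : List (String × List String)) : Decidable (Pre_determine_label nodes clusters) := by unfold Pre_determine_label; infer_instance
def pvWitness_determine_label : (List (List (String × Int))) × (List (String × List String)) :=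
  ([[("a", 1)], [("b", 2)]], [("c0", ["a", "b"]), ("c1", ["b"])])

def Spec_determine_label (nodes : List (List (String × Int))) (clusters : List (String × List String)) (out : String) : Prop := out = determine_label_alt nodes clusters
instance (nodes : List (List (String × Int))) (clusters : List (String × List String)) (out : String) : Decidable (Spec_determine_label nodes clusters out) := by unfold Spec_determine_label; infer_instance

-- ===== CLAIM (what is proved, stated in full; the proofs are below) =====
def Claim_equal_determine_label : Prop := ∀ (nodes : List (List (String × Int))) (clusters : List (String × List String)), Dom_determine_label nodes clusters → Pre_determine_label nodes clusters → Spec_determine_label nodes clusters (determine_label nodes clusters)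

-- ===== LEMMAS AND PROOFS =====

def pvLab (node : List (String × Int)) : Option String := (PySem.Dict.ofList node).keys.head?

def pvCnt (nodes : List (List (String × Int))) (v : List String) : Int :=
  ((nodes.countP (fun node => match pvLab node with
    | some l => v.contains l
    | none => false) : Nat) : Int)

theorem pvA_inner (nodes : List (List (String × Int))) (k : String) (v : List String)
    (d : PySem.Dict String Int) (c : Int) :
    nodes.foldl (fun cc node =>
      match (PySem.Dict.ofList node).keys.head? with
      | some label => if v.contains label then cc.insert k (cc.getD k 0 + 1) else cc
      | none => cc) (d.insert k c)
    = d.insert k (c + pvCnt nodes v) := by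
  induction nodes generalizing c with
  | nil => simp [pvCnt]
  | cons n ns ih =>
    simp only [List.foldl_cons]
    cases hl : (PySem.Dict.ofList n).keys.head? with
    | none =>
      rw [ih]
      simp [pvCnt, pvLab, List.countP_cons, hl]
    | some l =>
      by_cases hv : v.contains l
      · simp only [hl, hv, if_pos]
        rw [PySem.Dict.getD_insert_self, PySem.Dict.insert_insert_self, ih]
        simp only [pvCnt, pvLab, List.countP_cons, hl, hv]
        congr 1
        push_cast
        ring
      · have hv' : l ∉ v := by simpa using hv
        simp only [hl, hv, if_neg, Bool.false_eq_true, not_false_iff]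
        rw [ih]
        simp [pvCnt, pvLab, List.countP_cons, hl, hv']

theorem pvA_outer (nodes : List (List (String × Int))) (C : List (String × List String))
    (acc : PySem.Dict String Int)
    (hnd : (C.map Prod.fst).Nodup) (hf : ∀ k ∈ C.map Prod.fst, acc.contains k = false) :
    (C.foldl (fun cc kv =>
      nodes.foldl (fun cc node =>
        match (PySem.Dict.ofList node).keys.head? with
        | some label => if kv.2.contains label then cc.insert kv.1 (cc.getD kv.1 0 + 1) else cc
        | none => cc) (cc.insert kv.1 (0 : Int))) acc).items
    = acc.items ++ C.map (fun kv => (kv.1, pvCnt nodes kv.2)) := by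
  induction C generalizing acc with
  | nil => simp
  | cons kv rest ih =>
    simp only [List.map_cons, List.nodup_cons] at hnd
    simp only [List.foldl_cons]
    rw [pvA_inner]
    have hkv : acc.contains kv.1 = false := hf kv.1 (by simp)
    rw [ih _ hnd.2]
    · rw [PySem.Dict.items_insert_of_not_contains _ _ hkv]
      simp
    · intro k hk
      rw [PySem.Dict.contains_insert]
      have : k ≠ kv.1 := fun h => hnd.1 (h ▸ hk)
      simp [this, hf k (by simp [hk])]

theorem pvB_idx_inner (v : List String) (k : String) (idx : PySem.Dict String (List String)) (l : String) :
    (v.foldl (fun idx label =>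
        let ks := idx.getD label []
        if ks.contains k then idx else idx.insert label (ks ++ [k])) idx).getD l []
    = if (idx.getD l []).contains k then idx.getD l []
      else idx.getD l [] ++ (if v.contains l then [k] else []) := by
  induction v generalizing idx with
  | nil => by_cases h : (idx.getD l []).contains k <;> simp [h]
  | cons a v' ih =>
    simp only [List.foldl_cons]
    by_cases ha : (idx.getD a []).contains k
    · simp only [ha, if_pos]
      rw [ih]
      by_cases hla : l = a
      · subst hla
        have ha' : k ∈ idx.getD l [] := by simpa using ha
        simp [ha']
      · simp [List.contains_cons, hla, Ne.symm hla]
    · simp only [ha, if_neg, Bool.false_eq_true, not_false_iff]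
      rw [ih, PySem.Dict.getD_insert]
      by_cases hla : l = a
      · subst hla
        have ha' : k ∉ idx.getD l [] := by simpa using ha
        simp [ha', List.contains_cons]
      · simp [hla, List.contains_cons, Ne.symm hla]

theorem pvB_idx (C : List (String × List String)) (idx : PySem.Dict String (List String))
    (hnd : (C.map Prod.fst).Nodup)
    (hf : ∀ l k', k' ∈ idx.getD l [] → k' ∉ C.map Prod.fst) (l : String) :
    (C.foldl (fun idx kv =>
        kv.2.foldl (fun idx label =>
          let ks := idx.getD label []
          if ks.contains kv.1 then idx else idx.insert label (ks ++ [kv.1])) idx) idx).getD l []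
    = idx.getD l [] ++ (C.filter (fun kv => kv.2.contains l)).map Prod.fst := by
  induction C generalizing idx with
  | nil => simp
  | cons kv rest ih =>
    simp only [List.map_cons, List.nodup_cons] at hnd
    simp only [List.foldl_cons]
    rw [ih _ hnd.2]
    · have hk : ∀ l', (idx.getD l' []).contains kv.1 = false := by
        intro l'
        by_cases h : kv.1 ∈ idx.getD l' []
        · exact absurd (by simp) (hf l' kv.1 h)
        · simpa using h
      rw [pvB_idx_inner, hk l]
      simp only [Bool.false_eq_true, if_neg, not_false_iff, List.filter_cons]
      by_cases hv : l ∈ kv.2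
      · simp [hv, List.append_assoc]
      · simp [hv]
    · intro l' k' hk'
      rw [pvB_idx_inner] at hk'
      by_cases h1 : (idx.getD l' []).contains kv.1
      · -- impossible: kv.1 fresh
        exfalso
        by_cases h : kv.1 ∈ idx.getD l' []
        · exact (hf l' kv.1 h) (by simp)
        · exact h (by simpa using h1)
      · simp only [h1, if_neg, Bool.false_eq_true, not_false_iff, List.mem_append] at hk'
        rcases hk' with h | h
        · intro hmem
          exact (hf l' k' h) (by simp [hmem])
        · have : k' = kv.1 := by
            by_cases hvl : l' ∈ kv.2 <;> simp [hvl] at h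
            exact h
          subst this
          simpa using hnd.1

theorem pvB_bump (C : List (String × List String)) (counts : PySem.Dict String Int)
    (h : String → Int) (hnd : (C.map Prod.fst).Nodup)
    (hit : counts.items = C.map (fun kv => (kv.1, h kv.1))) (k : String) (hk : k ∈ C.map Prod.fst) :
    (counts.insert k (counts.getD k 0 + 1)).items
    = C.map (fun kv => (kv.1, if kv.1 = k then h k + 1 else h kv.1)) := by
  have hkeys : counts.keys = C.map Prod.fst := by
    show counts.items.map Prod.fst = _
    rw [hit, List.map_map]
    rfl
  have hndk : counts.keys.Nodup := by rw [hkeys]; exact hnd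
  have hcont : counts.contains k = true := by
    rw [PySem.Dict.contains_iff_mem_keys, hkeys]; exact hk
  have hgd : counts.getD k 0 = h k := by
    have : (k, h k) ∈ counts.items := by
      rw [hit]
      rcases List.mem_map.1 hk with ⟨kv, hkv, hfst⟩
      exact List.mem_map.2 ⟨kv, hkv, by rw [hfst]⟩
    exact PySem.Dict.getD_of_mem_items _ this hndk 0
  rw [PySem.Dict.items_insert_of_contains _ _ hcont, hit, hgd, List.map_map]
  apply List.map_congr_left
  intro kv _
  by_cases hkk : kv.1 = k <;> simp [hkk]

theorem pvB_bumps (C : List (String × List String)) (ks : List String)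
    (counts : PySem.Dict String Int) (h : String → Int) (hnd : (C.map Prod.fst).Nodup)
    (hit : counts.items = C.map (fun kv => (kv.1, h kv.1)))
    (hks : ∀ x ∈ ks, x ∈ C.map Prod.fst) :
    (ks.foldl (fun c k => c.insert k (c.getD k 0 + 1)) counts).items
    = C.map (fun kv => (kv.1, h kv.1 + (ks.count kv.1 : Int))) := by
  induction ks generalizing counts h with
  | nil => simpa using hit
  | cons k ks' ih =>
    simp only [List.foldl_cons]
    rw [ih _ (fun x => if x = k then h k + 1 else h x)
        (pvB_bump C counts h hnd hit k (hks k (by simp)))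
        (fun x hx => hks x (by simp [hx]))]
    apply List.map_congr_left
    intro kv _
    by_cases hkk : kv.1 = k
    · simp [hkk, List.count_cons]
      push_cast; ring
    · simp [hkk, List.count_cons]
      exact fun hh => hkk hh.symm

theorem pvB_nodes (C : List (String × List String)) (idx : PySem.Dict String (List String))
    (nodes : List (List (String × Int))) (counts : PySem.Dict String Int) (h : String → Int)
    (hnd : (C.map Prod.fst).Nodup)
    (hit : counts.items = C.map (fun kv => (kv.1, h kv.1)))
    (hidx : ∀ l x, x ∈ idx.getD l [] → x ∈ C.map Prod.fst) :
    (nodes.foldl (fun counts node =>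
      match (PySem.Dict.ofList node).keys.head? with
      | some label => (idx.getD label []).foldl (fun c k => c.insert k (c.getD k 0 + 1)) counts
      | none => counts) counts).items
    = C.map (fun kv => (kv.1, h kv.1 +
        (nodes.map (fun n => match pvLab n with
          | some l => ((idx.getD l []).count kv.1 : Int)
          | none => 0)).sum)) := by
  induction nodes generalizing counts h with
  | nil => simpa using hit
  | cons n ns ih =>
    simp only [List.foldl_cons]
    cases hl : (PySem.Dict.ofList n).keys.head? with
    | none =>
      rw [ih _ _ hit]
      simp [pvLab, hl]
    | some l =>
      rw [ih _ (fun x => h x + ((idx.getD l []).count x : Int))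
          (pvB_bumps C (idx.getD l []) counts h hnd hit (fun x hx => hidx l x hx))]
      apply List.map_congr_left
      intro kv _
      simp [pvLab, hl]
      ring

-- a 0/1 sum over node labels is A's countP
-- members of a fst-nodup pair list are determined by their first component
theorem pv_fst_inj {α β : Type} {C : List (α × β)} (hnd : (C.map Prod.fst).Nodup)
    {x y : α × β} (hx : x ∈ C) (hy : y ∈ C) (h : x.1 = y.1) : x = y := by
  induction C with
  | nil => cases hx
  | cons z rest ih =>
    simp only [List.map_cons, List.nodup_cons] at hnd
    rcases List.mem_cons.1 hx with rfl | hx' <;> rcases List.mem_cons.1 hy with rfl | hy'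
    · rfl
    · exact absurd (h ▸ List.mem_map.2 ⟨y, hy', rfl⟩) hnd.1
    · exact absurd (h ▸ List.mem_map.2 ⟨x, hx', rfl⟩) hnd.1
    · exact ih hnd.2 hx' hy'

theorem pv_sum (nodes : List (List (String × Int))) (P : String → Bool) :
    (nodes.map (fun n => match pvLab n with
      | some l => (if P l then (1 : Int) else 0)
      | none => 0)).sum
    = ((nodes.countP (fun n => match pvLab n with
      | some l => P l
      | none => false) : Nat) : Int) := by
  induction nodes with
  | nil => simp
  | cons n ns ih =>
    simp only [List.map_cons, List.sum_cons, List.countP_cons, ih]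
    cases hl : pvLab n with
    | none => simp
    | some l => by_cases hP : P l <;> simp [hP] <;> push_cast <;> ring

theorem pv_dicts (nodes : List (List (String × Int))) (C : List (String × List String))
    (hnd : (C.map Prod.fst).Nodup) :
    (C.foldl (fun cc kv =>
      nodes.foldl (fun cc node =>
        match (PySem.Dict.ofList node).keys.head? with
        | some label => if kv.2.contains label then cc.insert kv.1 (cc.getD kv.1 0 + 1) else cc
        | none => cc) (cc.insert kv.1 (0 : Int))) (PySem.Dict.empty : PySem.Dict String Int))
    = nodes.foldl (fun counts node =>
        match (PySem.Dict.ofList node).keys.head? with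
        | some label =>
            (((C.foldl (fun idx kv =>
                kv.2.foldl (fun idx label =>
                  let ks := idx.getD label []
                  if ks.contains kv.1 then idx else idx.insert label (ks ++ [kv.1])) idx)
                PySem.Dict.empty).getD label []).foldl (fun c k => c.insert k (c.getD k 0 + 1)) counts)
        | none => counts)
      (C.foldl (fun c kv => c.insert kv.1 (0 : Int)) (PySem.Dict.empty : PySem.Dict String Int)) := by
  have hidxc : ∀ l, (C.foldl (fun idx kv =>
      kv.2.foldl (fun idx label =>
        let ks := idx.getD label []
        if ks.contains kv.1 then idx else idx.insert label (ks ++ [kv.1])) idx)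
      PySem.Dict.empty).getD l [] = (C.filter (fun kv => kv.2.contains l)).map Prod.fst := by
    intro l
    rw [pvB_idx C PySem.Dict.empty hnd (by simp [PySem.Dict.getD_empty]) l]
    simp [PySem.Dict.getD_empty]
  have hinit : (C.foldl (fun c kv => c.insert kv.1 (0 : Int)) (PySem.Dict.empty : PySem.Dict String Int)).items
      = C.map (fun kv => (kv.1, (0 : Int))) := by
    have := PySem.Dict.items_foldl_insert_fresh C (fun kv => kv.1) (fun _ => (0 : Int))
      PySem.Dict.empty (by simp) (by simpa using hnd)
    simpa using this
  apply PySem.Dict.ext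
  rw [pvA_outer nodes C PySem.Dict.empty hnd (by simp)]
  rw [pvB_nodes C _ nodes _ (fun _ => (0 : Int)) hnd hinit (by
    intro l x hx
    rw [hidxc l] at hx
    rcases List.mem_map.1 hx with ⟨kv, hkv, hfst⟩
    exact hfst ▸ List.mem_map.2 ⟨kv, (List.mem_filter.1 hkv).1, rfl⟩)]
  have hie : (PySem.Dict.empty : PySem.Dict String Int).items = [] := rfl
  rw [hie, List.nil_append]
  apply List.map_congr_left
  intro kv hkv
  have hndkeys : (C.map Prod.fst).Nodup := hnd
  have hcount : ∀ l, (((C.foldl (fun idx kv =>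
      kv.2.foldl (fun idx label =>
        let ks := idx.getD label []
        if ks.contains kv.1 then idx else idx.insert label (ks ++ [kv.1])) idx)
      PySem.Dict.empty).getD l []).count kv.1 : Int)
      = if kv.2.contains l then 1 else 0 := by
    intro l
    rw [hidxc l]
    have hsub : ((C.filter (fun kv => kv.2.contains l)).map Prod.fst).Sublist (C.map Prod.fst) :=
      List.Sublist.map Prod.fst List.filter_sublist
    have hndf : ((C.filter (fun kv => kv.2.contains l)).map Prod.fst).Nodup := hnd.sublist hsub
    by_cases hm : kv.1 ∈ (C.filter (fun kv => kv.2.contains l)).map Prod.fst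
    · rcases List.mem_map.1 hm with ⟨kv', hkv', hfst⟩
      have hkv'C := (List.mem_filter.1 hkv').1
      have heq : kv' = kv := pv_fst_inj hnd hkv'C hkv hfst
      rw [List.count_eq_one_of_mem hndf hm]
      have hl' : l ∈ kv.2 := by
        have := (List.mem_filter.1 hkv').2
        rw [heq] at this
        simpa using this
      simp [hl']
    · rw [List.count_eq_zero_of_not_mem hm]
      have : ¬ kv.2.contains l := by
        intro hc
        exact hm (List.mem_map.2 ⟨kv, List.mem_filter.2 ⟨hkv, by simpa using hc⟩, rfl⟩)
      simp [this]
      intro hc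
      exact absurd (by simpa using hc) this
  congr 1
  have hmap : (nodes.map (fun n => match pvLab n with
      | some l => (((C.foldl (fun idx kv =>
          kv.2.foldl (fun idx label =>
            let ks := idx.getD label []
            if ks.contains kv.1 then idx else idx.insert label (ks ++ [kv.1])) idx)
          PySem.Dict.empty).getD l []).count kv.1 : Int)
      | none => 0))
      = nodes.map (fun n => match pvLab n with
      | some l => (if kv.2.contains l then (1 : Int) else 0)
      | none => 0) :=
    List.map_congr_left (fun n _ => by
      cases hl : pvLab n with
      | none => rfl
      | some l => simp only [hl]; rw [hcount l])
  rw [hmap, pv_sum nodes (fun l => kv.2.contains l)]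
  simp [pvCnt]

theorem pv_main (nodes : List (List (String × Int))) (clusters : List (String × List String)) :
    determine_label nodes clusters = determine_label_alt nodes clusters := by
  have hnd : ((PySem.Dict.ofList clusters).items.map Prod.fst).Nodup := by
    have h := PySem.Dict.nodup_keys_ofList (κ := String) (ν := List String) clusters
    simpa [PySem.Dict.keys] using h
  have hd := pv_dicts nodes (PySem.Dict.ofList clusters).items hnd
  have hsplit := PySem.List.foldl_prod_mk
    (fun (idx : PySem.Dict String (List String)) (kv : String × List String) =>
      kv.2.foldl (fun idx label =>
        let ks := idx.getD label []
        if ks.contains kv.1 then idx else idx.insert label (ks ++ [kv.1])) idx)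
    (fun (c : PySem.Dict String Int) (kv : String × List String) => c.insert kv.1 (0 : Int))
    (PySem.Dict.ofList clusters).items PySem.Dict.empty PySem.Dict.empty
  simp only [determine_label, determine_label_alt, hsplit]
  rw [hd]

-- ===== VERDICT (by name: the statement is the Claim_ definition above) =====
theorem determine_label_spec : Claim_equal_determine_label := by
  intro nodes clusters _ _
  unfold Spec_determine_label
  exact pv_main nodes clusters
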